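-- pv_equiv track=rewrite | github.com/IgrMd/yandex-algos-training | Тренировки по алгоритмам 6.0/Лекция 2. Префиксные суммы и два указателя/I.py | algorithms
-- ===== SOURCE A (Python) =====
-- def algorithms(n, arr_a: list, arr_b: list, mood: list):
--     a_b_i = []
--     b_a_i = []
--     visited = [False] * n
--     ans = [0] * n
--     for i in range(n):
--         a_b_i.append((arr_a[i], arr_b[i], i))
--         b_a_i.append((arr_b[i], arr_a[i], i))
--     a_b_i.sort(key=lambda x: (-x[0], -x[1], x[2]))
--     b_a_i.sort(key=lambda x: (-x[0], -x[1], x[2]))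
--     a, b = 0, 0
--     i = 0
--     while i != n:
--         while visited[a_b_i[a][2]]:
--             a += 1
--         while visited[b_a_i[b][2]]:
--             b += 1
--         if mood[i] == 1:
--             picked = b_a_i[b][2]
--             b += 1
--         else:
--             picked = a_b_i[a][2]
--             a += 1
--         visited[picked] = True
--         ans[i] = picked + 1
--         i += 1
--
--     return ans
-- ===== SOURCE B (Python) =====
-- def algorithms(n, arr_a: list, arr_b: list, mood: list):
--     visited = [False] * n
--     ans = []
--     for m in mood[:n]:
--         best = -1
--         for j in range(n):
--             if visited[j]:
--                 continue
--             if best < 0: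
--                 best = j
--             elif m == 1:
--                 if (arr_b[j], arr_a[j]) > (arr_b[best], arr_a[best]):
--                     best = j
--             else:
--                 if (arr_a[j], arr_b[j]) > (arr_a[best], arr_b[best]):
--                     best = j
--         visited[best] = True
--         ans.append(best + 1)
--     return ans
-- ===== Notes on version B (the rewrite author's own statement) =====
-- stated objective: simpler
-- what changed: B drops the two pre-sorted tuple lists and their persistent skip pointers entirely: for each mood it does one direct argmax scan over the unvisited indices with an explicit lexicographic comparison, which is shorter and plainer though asymptotically slower.
import Mathlib
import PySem

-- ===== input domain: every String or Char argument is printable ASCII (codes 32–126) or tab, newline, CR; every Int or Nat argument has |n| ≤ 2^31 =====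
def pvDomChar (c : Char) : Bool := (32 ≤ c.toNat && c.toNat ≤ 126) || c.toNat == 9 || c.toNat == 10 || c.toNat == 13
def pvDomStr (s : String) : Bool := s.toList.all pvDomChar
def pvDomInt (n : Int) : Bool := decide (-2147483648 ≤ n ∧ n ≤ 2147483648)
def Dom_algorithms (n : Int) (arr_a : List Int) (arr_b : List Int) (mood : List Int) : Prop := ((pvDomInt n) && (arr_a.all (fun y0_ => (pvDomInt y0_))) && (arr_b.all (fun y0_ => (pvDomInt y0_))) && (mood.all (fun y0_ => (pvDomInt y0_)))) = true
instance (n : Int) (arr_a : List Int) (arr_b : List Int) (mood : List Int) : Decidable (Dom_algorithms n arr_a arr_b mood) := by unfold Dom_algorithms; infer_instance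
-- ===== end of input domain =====

-- B replaces A's two pre-sorted tuple lists with persistent skip pointers by a direct
-- per-step argmax scan over the unvisited indices (simpler; not faster).

-- ===== PORT A =====
-- xs[i]; the default 0 is never used under Pre_ (all indices are in range there)
def pvGetI (xs : List Int) (i : Int) : Int := (PySem.List.pyGet? xs i).getD 0
-- visited[i]; default never used under Pre_
def pvGetB (vis : List Bool) (i : Int) : Bool := (PySem.List.pyGet? vis i).getD false
-- Python's sort key (-x[0], -x[1], x[2]) : tuples compare lexicographically = Lex order
def pvKey3 (x : Int × Int × Int) : Lex (Int × Lex (Int × Int)) := toLex (-x.1, toLex (-x.2.1, x.2.2))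
-- the append loop building a_b_i / b_a_i
def pvTuples (u v : List Int) (n : Int) : List (Int × Int × Int) :=
  (PySem.List.pyRange 0 n 1).map (fun i => (pvGetI u i, pvGetI v i, i))

-- while visited[L[p][2]]: p += 1   (out-of-range stop never happens under Pre_)
def pvSkip (L : List (Int × Int × Int)) (vis : List Bool) (p : Nat) : Nat :=
  if h : p < L.length then
    if pvGetB vis (L[p]).2.2 then pvSkip L vis (p + 1) else p
  else p
termination_by L.length - p

-- the `while i != n` loop; fuel = n - i
def pvLoopA (La Lb : List (Int × Int × Int)) (mood : List Int) :
    Nat → Nat → List Bool → List Int → Nat → Nat → List Int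
  | 0, _, _, ans, _, _ => ans
  | fuel + 1, i, vis, ans, a, b =>
    let a' := pvSkip La vis a
    let b' := pvSkip Lb vis b
    if PySem.List.pyGetD mood (i : Int) 0 == 1 then
      let picked := (Lb.getD b' (0, 0, 0)).2.2
      pvLoopA La Lb mood fuel (i + 1) (PySem.List.pySetD vis picked true)
        (PySem.List.pySetD ans (i : Int) (picked + 1)) a' (b' + 1)
    else
      let picked := (La.getD a' (0, 0, 0)).2.2
      pvLoopA La Lb mood fuel (i + 1) (PySem.List.pySetD vis picked true)
        (PySem.List.pySetD ans (i : Int) (picked + 1)) (a' + 1) b'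

def algorithms (n : Int) (arr_a : List Int) (arr_b : List Int) (mood : List Int) : List Int :=
  let visited := List.replicate n.toNat false
  let ans := List.replicate n.toNat (0 : Int)
  let a_b_i := pvTuples arr_a arr_b n
  let b_a_i := pvTuples arr_b arr_a n
  let La := PySem.List.sorted a_b_i pvKey3 false
  let Lb := PySem.List.sorted b_a_i pvKey3 false
  pvLoopA La Lb mood n.toNat 0 visited ans 0 0

-- ===== PORT B =====
-- (u[j], v[j]) > (u[best], v[best])  (Python tuple comparison, spelt out)
def pvBetter (u v : List Int) (j best : Int) : Bool :=
  decide (pvGetI u j > pvGetI u best ∨ (pvGetI u j = pvGetI u best ∧ pvGetI v j > pvGetI v best))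

-- the inner `for j in range(n)` argmax scan
def pvBest (arr_a arr_b : List Int) (m : Int) (vis : List Bool) (n : Int) : Int :=
  (PySem.List.pyRange 0 n 1).foldl (fun best j =>
    if pvGetB vis j then best
    else if best < 0 then j
    else if m == 1 then (if pvBetter arr_b arr_a j best then j else best)
    else (if pvBetter arr_a arr_b j best then j else best)) (-1)

def algorithms_alt (n : Int) (arr_a : List Int) (arr_b : List Int) (mood : List Int) : List Int :=
  ((PySem.List.slice mood none (some n)).foldl
    (fun (st : List Bool × List Int) m =>
      let best := pvBest arr_a arr_b m st.1 n
      (PySem.List.pySetD st.1 best true, st.2 ++ [best + 1]))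
    (List.replicate n.toNat false, ([] : List Int))).2

-- ===== PRECONDITION & SPEC =====
-- exactly the inputs on which A returns: n ≥ 0 and the first n entries of all three lists exist
def Pre_algorithms (n : Int) (arr_a : List Int) (arr_b : List Int) (mood : List Int) : Prop :=
  0 ≤ n ∧ n ≤ (arr_a.length : Int) ∧ n ≤ (arr_b.length : Int) ∧ n ≤ (mood.length : Int)

instance (n : Int) (arr_a : List Int) (arr_b : List Int) (mood : List Int) :
    Decidable (Pre_algorithms n arr_a arr_b mood) := by unfold Pre_algorithms; infer_instance

def pvWitness_algorithms : Int × List Int × List Int × List Int := (3, [2, 1, 2], [5, 7, 7], [1, 0, 1])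

def Spec_algorithms (n : Int) (arr_a : List Int) (arr_b : List Int) (mood : List Int)
    (out : List Int) : Prop := out = algorithms_alt n arr_a arr_b mood

instance (n : Int) (arr_a : List Int) (arr_b : List Int) (mood : List Int) (out : List Int) :
    Decidable (Spec_algorithms n arr_a arr_b mood out) := by unfold Spec_algorithms; infer_instance

-- ===== CLAIM =====
def Claim_equal_algorithms : Prop := ∀ (n : Int) (arr_a : List Int) (arr_b : List Int) (mood : List Int),
  Dom_algorithms n arr_a arr_b mood → Pre_algorithms n arr_a arr_b mood →
  Spec_algorithms n arr_a arr_b mood (algorithms n arr_a arr_b mood)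

-- ===== LEMMAS AND PROOFS =====

-- the sort key of index j's tuple
def pvIdxKey (u v : List Int) (j : Int) : Lex (Int × Lex (Int × Int)) :=
  pvKey3 (pvGetI u j, pvGetI v j, j)

-- "j is the pick": unvisited, in range, key-minimal among unvisited indices
def pvIsBest (u v : List Int) (n : Int) (vis : List Bool) (j : Int) : Prop :=
  0 ≤ j ∧ j < n ∧ pvGetB vis j = false ∧
    ∀ k : Int, 0 ≤ k → k < n → pvGetB vis k = false → pvIdxKey u v j ≤ pvIdxKey u v k

lemma pvIdxKey_inj (u v : List Int) {j k : Int} (h : pvIdxKey u v j = pvIdxKey u v k) : j = k := by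
  simp [pvIdxKey, pvKey3, toLex, Prod.ext_iff] at h
  exact h.2.2

lemma pvIdxKey_lt_iff (u v : List Int) (j k : Int) :
    pvIdxKey u v j < pvIdxKey u v k ↔
      (pvGetI u k < pvGetI u j ∨ (pvGetI u j = pvGetI u k ∧
        (pvGetI v k < pvGetI v j ∨ (pvGetI v j = pvGetI v k ∧ j < k)))) := by
  simp [pvIdxKey, pvKey3, Prod.Lex.lt_iff]

lemma pvIdxKey_lt_of_better {u v : List Int} {j b : Int} (h : pvBetter u v j b = true) :
    pvIdxKey u v j < pvIdxKey u v b := by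
  simp [pvBetter] at h
  rw [pvIdxKey_lt_iff]
  omega

lemma pvIdxKey_lt_of_not_better {u v : List Int} {j b : Int} (h : pvBetter u v j b = false)
    (hlt : b < j) : pvIdxKey u v b < pvIdxKey u v j := by
  simp [pvBetter] at h
  rw [pvIdxKey_lt_iff]
  omega

lemma pvIsBest_unique {u v : List Int} {n : Int} {vis : List Bool} {j j' : Int}
    (h : pvIsBest u v n vis j) (h' : pvIsBest u v n vis j') : j = j' := by
  obtain ⟨h0, hn, hv, hmin⟩ := h
  obtain ⟨h0', hn', hv', hmin'⟩ := h'
  exact pvIdxKey_inj u v (le_antisymm (hmin j' h0' hn' hv') (hmin' j h0 hn hv))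

lemma pvGetB_natCast (vis : List Bool) (k : Nat) (hk : k < vis.length) :
    pvGetB vis (k : Int) = vis[k] := by
  simp [pvGetB, PySem.List.pyGet?_natCast, List.getElem?_eq_getElem hk]

lemma pvGetB_toNat {vis : List Bool} {k : Int} (h0 : 0 ≤ k) :
    pvGetB vis k = vis.getD k.toNat false := by
  have hc : ((k.toNat : Nat) : Int) = k := by omega
  rw [← hc]
  unfold pvGetB
  rw [PySem.List.pyGet?_natCast, ← List.getD_eq_getElem?_getD, Int.toNat_natCast]

lemma pvGetB_true_range {vis : List Bool} {x : Int} (h : pvGetB vis x = true) :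
    x < (vis.length : Int) := by
  by_contra hge
  have hnone : PySem.List.pyGet? vis x = none := by
    rw [PySem.List.pyGet?_eq_none_iff]
    simp [PySem.Raise.InRange]
    omega
  simp [pvGetB, hnone] at h

lemma pvGetB_set_self {vis : List Bool} {j : Int} (h0 : 0 ≤ j) (hj : j < (vis.length : Int)) :
    pvGetB (vis.set j.toNat true) j = true := by
  rw [pvGetB_toNat h0]
  rw [List.getD_eq_getElem _ _ (by simp; omega)]
  simp

lemma pvGetB_set_mono {vis : List Bool} {x : Int} (t : Nat) (h0 : 0 ≤ x)
    (h : pvGetB vis x = true) : pvGetB (vis.set t true) x = true := by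
  have hlt := pvGetB_true_range h
  rw [pvGetB_toNat h0] at h
  rw [pvGetB_toNat h0]
  rw [List.getD_eq_getElem _ _ (by omega)] at h
  rw [List.getD_eq_getElem _ _ (by simp; omega)]
  rw [List.getElem_set]
  split
  · rfl
  · exact h

lemma pvCount_false_set (vis : List Bool) (j : Nat) (hj : j < vis.length)
    (h : vis[j] = false) : (vis.set j true).count false + 1 = vis.count false := by
  induction vis generalizing j with
  | nil => simp at hj
  | cons x xs ih =>
    cases j with
    | zero =>
      simp at h
      simp [h]
    | succ j =>
      simp at hj h
      have := ih j hj h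
      simp [List.count_cons]
      omega

lemma pvExists_unvisited {vis : List Bool} (h : 0 < vis.count false) :
    ∃ k : Nat, ∃ hk : k < vis.length, vis[k] = false := by
  exact List.getElem_of_mem (List.count_pos_iff.mp h)

-- ---- structure of L = sorted (pvTuples u v n) ----

lemma pvL_mem {u v : List Int} {n : Int} {x : Int × Int × Int}
    (hx : x ∈ PySem.List.sorted (pvTuples u v n) pvKey3 false) :
    0 ≤ x.2.2 ∧ x.2.2 < n ∧ x = (pvGetI u x.2.2, pvGetI v x.2.2, x.2.2) := by
  rw [PySem.List.mem_sorted] at hx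
  simp only [pvTuples, List.mem_map] at hx
  obtain ⟨i, hi, rfl⟩ := hx
  rw [PySem.List.mem_pyRange_one] at hi
  exact ⟨hi.1, hi.2, rfl⟩

lemma pvL_idx_mem {u v : List Int} {n j : Int} (h0 : 0 ≤ j) (hj : j < n) :
    (pvGetI u j, pvGetI v j, j) ∈ PySem.List.sorted (pvTuples u v n) pvKey3 false := by
  rw [PySem.List.mem_sorted]
  simp only [pvTuples, List.mem_map]
  exact ⟨j, by rw [PySem.List.mem_pyRange_one]; exact ⟨h0, hj⟩, rfl⟩

-- ---- the skip loop ----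

lemma pvSkip_spec (L : List (Int × Int × Int)) (vis : List Bool) (a : Nat)
    (q0 : Nat) (ha : a ≤ q0) (hq0 : q0 < L.length)
    (hv : pvGetB vis (L.getD q0 (0, 0, 0)).2.2 = false) :
    a ≤ pvSkip L vis a ∧ pvSkip L vis a < L.length ∧
      pvGetB vis (L.getD (pvSkip L vis a) (0, 0, 0)).2.2 = false ∧
      ∀ q, a ≤ q → q < pvSkip L vis a → pvGetB vis (L.getD q (0, 0, 0)).2.2 = true := by
  have main : ∀ m a, a ≤ q0 → q0 - a = m →
      a ≤ pvSkip L vis a ∧ pvSkip L vis a < L.length ∧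
        pvGetB vis (L.getD (pvSkip L vis a) (0, 0, 0)).2.2 = false ∧
        ∀ q, a ≤ q → q < pvSkip L vis a → pvGetB vis (L.getD q (0, 0, 0)).2.2 = true := by
    intro m
    induction m with
    | zero =>
      intro a ha' hd
      have hEq : a = q0 := by omega
      subst hEq
      rw [pvSkip, dif_pos hq0]
      rw [List.getD_eq_getElem _ _ hq0] at hv
      rw [if_neg (by simp [hv])]
      refine ⟨le_refl _, hq0, ?_, ?_⟩
      · rw [List.getD_eq_getElem _ _ hq0]; exact hv
      · intro q hq1 hq2; omega
    | succ m ih =>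
      intro a ha' hd
      have halen : a < L.length := by omega
      rw [pvSkip, dif_pos halen]
      by_cases hc : pvGetB vis (L[a]).2.2
      · rw [if_pos hc]
        obtain ⟨h1, h2, h3, h4⟩ := ih (a + 1) (by
          rcases Nat.lt_or_ge a q0 with h | h
          · omega
          · exfalso
            have hEq : a = q0 := by omega
            subst hEq
            rw [List.getD_eq_getElem _ _ hq0] at hv
            simp [hv] at hc) (by omega)
        refine ⟨by omega, h2, h3, ?_⟩
        intro q hq1 hq2
        rcases Nat.eq_or_lt_of_le hq1 with h | h
        · subst h; rw [List.getD_eq_getElem _ _ halen]; exact hc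
        · exact h4 q (by omega) hq2
      · rw [if_neg hc]
        refine ⟨le_refl _, halen, ?_, ?_⟩
        · rw [List.getD_eq_getElem _ _ halen]; simpa using hc
        · intro q hq1 hq2; omega
  exact main (q0 - a) a ha rfl

-- ---- A's pick is the key-minimal unvisited index ----

lemma pvPickA (u v : List Int) (n : Int) (vis : List Bool)
    (j0 : Int) (hj00 : 0 ≤ j0) (hj0n : j0 < n) (hj0v : pvGetB vis j0 = false)
    (a : Nat)
    (hinv : ∀ q, q < a → q < (PySem.List.sorted (pvTuples u v n) pvKey3 false).length →
      pvGetB vis ((PySem.List.sorted (pvTuples u v n) pvKey3 false).getD q (0, 0, 0)).2.2 = true) :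
    pvSkip (PySem.List.sorted (pvTuples u v n) pvKey3 false) vis a <
        (PySem.List.sorted (pvTuples u v n) pvKey3 false).length ∧
      pvIsBest u v n vis
        (((PySem.List.sorted (pvTuples u v n) pvKey3 false).getD
          (pvSkip (PySem.List.sorted (pvTuples u v n) pvKey3 false) vis a) (0, 0, 0)).2.2) ∧
      ∀ q, q < pvSkip (PySem.List.sorted (pvTuples u v n) pvKey3 false) vis a →
        q < (PySem.List.sorted (pvTuples u v n) pvKey3 false).length →
        pvGetB vis ((PySem.List.sorted (pvTuples u v n) pvKey3 false).getD q (0, 0, 0)).2.2 = true := by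
  set L := PySem.List.sorted (pvTuples u v n) pvKey3 false with hL
  -- the tuple of j0 sits somewhere in L, at or after a
  obtain ⟨q0, hq0len, hq0eq⟩ := List.getElem_of_mem (pvL_idx_mem hj00 hj0n)
  have haq : a ≤ q0 := by
    by_contra hlt
    have := hinv q0 (by omega) hq0len
    rw [List.getD_eq_getElem _ _ hq0len, hq0eq] at this
    simp [this] at hj0v
  obtain ⟨hap, hplen, hpv, hpre⟩ := pvSkip_spec L vis a q0 haq hq0len
    (by rw [List.getD_eq_getElem _ _ hq0len, hq0eq]; exact hj0v)
  refine ⟨hplen, ?_, ?_⟩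
  · -- the element at the skip position
    rw [List.getD_eq_getElem _ _ hplen] at hpv ⊢
    obtain ⟨hp0, hpn, hpeq⟩ := pvL_mem (L.getElem_mem hplen)
    refine ⟨hp0, hpn, hpv, ?_⟩
    intro k hk0 hkn hkv
    obtain ⟨qk, hqklen, hqkeq⟩ := List.getElem_of_mem (pvL_idx_mem (u := u) (v := v) hk0 hkn)
    have hpq : pvSkip L vis a ≤ qk := by
      by_contra hlt
      rcases Nat.lt_or_ge qk a with h | h
      · have := hinv qk h hqklen
        rw [List.getD_eq_getElem _ _ hqklen, hqkeq] at this
        simp [this] at hkv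
      · have := hpre qk h (by omega)
        rw [List.getD_eq_getElem _ _ hqklen, hqkeq] at this
        simp [this] at hkv
    have hmono : pvKey3 (L[pvSkip L vis a]'hplen) ≤ pvKey3 (L[qk]'(by rw [hL]; exact hqklen)) :=
      PySem.List.key_sorted_getElem_mono (xs := pvTuples u v n) (key := pvKey3) hpq hqklen
    calc pvIdxKey u v (L[pvSkip L vis a]'hplen).2.2
        = pvKey3 (L[pvSkip L vis a]'hplen) := by rw [hpeq]; rfl
      _ ≤ pvKey3 (L[qk]'(by rw [hL]; exact hqklen)) := hmono
      _ = pvIdxKey u v k := by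
          rw [show (L[qk]'(by rw [hL]; exact hqklen)) = (pvGetI u k, pvGetI v k, k) from hqkeq]
          rfl
  · intro q hq1 hq2
    rcases Nat.lt_or_ge q a with h | h
    · exact hinv q h hq2
    · exact hpre q h hq1

-- ---- B's scan is the key-minimal unvisited index ----

def pvBestG (u v : List Int) (vis : List Bool) (t : Int) : Int :=
  (PySem.List.pyRange 0 t 1).foldl (fun best j =>
    if pvGetB vis j then best
    else if best < 0 then j
    else if pvBetter u v j best then j else best) (-1)

lemma pvBestG_inv (u v : List Int) (vis : List Bool) (t : Nat) :
    (pvBestG u v vis (t : Int) = -1 ∧ ∀ k : Int, 0 ≤ k → k < (t : Int) → pvGetB vis k = true) ∨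
    (0 ≤ pvBestG u v vis (t : Int) ∧ pvBestG u v vis (t : Int) < (t : Int) ∧
      pvGetB vis (pvBestG u v vis (t : Int)) = false ∧
      ∀ k : Int, 0 ≤ k → k < (t : Int) → pvGetB vis k = false →
        pvIdxKey u v (pvBestG u v vis (t : Int)) ≤ pvIdxKey u v k) := by
  induction t with
  | zero =>
    left
    constructor
    · simp [pvBestG, PySem.List.pyRange_one_eq_nil]
    · intro k hk0 hkt; omega
  | succ t ih =>
    have hcast : ((t + 1 : Nat) : Int) = (t : Int) + 1 := by push_cast; ring
    have hr : PySem.List.pyRange 0 ((t : Int) + 1) 1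
        = PySem.List.pyRange 0 (t : Int) 1 ++ [(t : Int)] := by
      simpa using PySem.List.pyRange_one_succ_right (a := 0) (b := (t : Int)) (by omega)
    have hstep : pvBestG u v vis ((t + 1 : Nat) : Int)
        = (if pvGetB vis (t : Int) then pvBestG u v vis (t : Int)
           else if pvBestG u v vis (t : Int) < 0 then (t : Int)
           else if pvBetter u v (t : Int) (pvBestG u v vis (t : Int)) then (t : Int)
           else pvBestG u v vis (t : Int)) := by
      rw [show pvBestG u v vis ((t + 1 : Nat) : Int) = pvBestG u v vis ((t : Int) + 1) from by rw [hcast]]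
      conv_lhs => unfold pvBestG
      rw [hr, List.foldl_append]
      rfl
    rw [hstep]
    rcases ih with ⟨hb, hall⟩ | ⟨hb0, hbt, hbv, hmin⟩
    · by_cases hvt : pvGetB vis (t : Int)
      · left
        rw [if_pos hvt]
        refine ⟨hb, ?_⟩
        intro k hk0 hkt
        rcases lt_or_eq_of_le (by omega : k ≤ (t : Int)) with h | h
        · exact hall k hk0 (by omega)
        · subst h; exact hvt
      · right
        rw [if_neg hvt, hb, if_pos (by omega)]
        refine ⟨by omega, by omega, by simpa using hvt, ?_⟩
        intro k hk0 hkt hkv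
        rcases lt_or_eq_of_le (by omega : k ≤ (t : Int)) with h | h
        · exact absurd (hall k hk0 (by omega)) (by simp [hkv])
        · subst h; exact le_refl _
    · by_cases hvt : pvGetB vis (t : Int)
      · right
        rw [if_pos hvt]
        refine ⟨hb0, by omega, hbv, ?_⟩
        intro k hk0 hkt hkv
        rcases lt_or_eq_of_le (by omega : k ≤ (t : Int)) with h | h
        · exact hmin k hk0 (by omega) hkv
        · subst h; simp [hvt] at hkv
      · rw [if_neg hvt, if_neg (by omega)]
        by_cases hbet : pvBetter u v (t : Int) (pvBestG u v vis (t : Int))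
        · right
          rw [if_pos hbet]
          refine ⟨by omega, by omega, by simpa using hvt, ?_⟩
          intro k hk0 hkt hkv
          rcases lt_or_eq_of_le (by omega : k ≤ (t : Int)) with h | h
          · exact le_trans (le_of_lt (pvIdxKey_lt_of_better hbet)) (hmin k hk0 (by omega) hkv)
          · subst h; exact le_refl _
        · right
          rw [if_neg hbet]
          refine ⟨hb0, by omega, hbv, ?_⟩
          intro k hk0 hkt hkv
          rcases lt_or_eq_of_le (by omega : k ≤ (t : Int)) with h | h
          · exact hmin k hk0 (by omega) hkv
          · subst h
            exact le_of_lt (pvIdxKey_lt_of_not_better (by simpa using hbet) (by omega))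

lemma pvBest_isBest (arr_a arr_b : List Int) (m : Int) (vis : List Bool) (n : Int) (hn : 0 ≤ n)
    (j0 : Int) (hj00 : 0 ≤ j0) (hj0n : j0 < n) (hj0v : pvGetB vis j0 = false) :
    (m = 1 → pvIsBest arr_b arr_a n vis (pvBest arr_a arr_b m vis n)) ∧
    (m ≠ 1 → pvIsBest arr_a arr_b n vis (pvBest arr_a arr_b m vis n)) := by
  have hcast : ((n.toNat : Nat) : Int) = n := by omega
  constructor
  · intro hm
    have he : pvBest arr_a arr_b m vis n = pvBestG arr_b arr_a vis n := by
      subst hm; simp [pvBest, pvBestG]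
    rw [he, ← hcast]
    rcases pvBestG_inv arr_b arr_a vis n.toNat with ⟨_, hall⟩ | ⟨h1, h2, h3, h4⟩
    · exact absurd (hall j0 hj00 (by omega)) (by simp [hj0v])
    · exact ⟨h1, h2, h3, fun k hk0 hkn hkv => h4 k hk0 hkn hkv⟩
  · intro hm
    have he : pvBest arr_a arr_b m vis n = pvBestG arr_a arr_b vis n := by
      have : (m == 1) = false := by simp [hm]
      simp [pvBest, pvBestG, this]
    rw [he, ← hcast]
    rcases pvBestG_inv arr_a arr_b vis n.toNat with ⟨_, hall⟩ | ⟨h1, h2, h3, h4⟩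
    · exact absurd (hall j0 hj00 (by omega)) (by simp [hj0v])
    · exact ⟨h1, h2, h3, fun k hk0 hkn hkv => h4 k hk0 hkn hkv⟩

-- ---- main simulation ----

lemma pvSim (arr_a arr_b mood : List Int) (n : Int) (hn : 0 ≤ n)
    (hm : n ≤ (mood.length : Int)) :
    ∀ fuel i (vis : List Bool) (ansB : List Int) (a b : Nat),
      vis.length = n.toNat → i + fuel = n.toNat → ansB.length = i →
      fuel ≤ vis.count false →
      (∀ q, q < a → q < (PySem.List.sorted (pvTuples arr_a arr_b n) pvKey3 false).length →
        pvGetB vis ((PySem.List.sorted (pvTuples arr_a arr_b n) pvKey3 false).getD q (0, 0, 0)).2.2 = true) →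
      (∀ q, q < b → q < (PySem.List.sorted (pvTuples arr_b arr_a n) pvKey3 false).length →
        pvGetB vis ((PySem.List.sorted (pvTuples arr_b arr_a n) pvKey3 false).getD q (0, 0, 0)).2.2 = true) →
      pvLoopA (PySem.List.sorted (pvTuples arr_a arr_b n) pvKey3 false)
          (PySem.List.sorted (pvTuples arr_b arr_a n) pvKey3 false)
          mood fuel i vis (ansB ++ List.replicate fuel 0) a b
        = (((PySem.List.slice mood none (some n)).drop i).foldl
            (fun (st : List Bool × List Int) m =>
              let best := pvBest arr_a arr_b m st.1 n
              (PySem.List.pySetD st.1 best true, st.2 ++ [best + 1]))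
            (vis, ansB)).2 := by
  intro fuel
  induction fuel with
  | zero =>
    intro i vis ansB a b hvlen hif hal hcnt hinvA hinvB
    have hdrop : (PySem.List.slice mood none (some n)).drop i = [] := by
      apply List.drop_eq_nil_of_le
      rw [PySem.List.slice_to mood hn]
      simp
      omega
    rw [hdrop]
    simp [pvLoopA]
  | succ fuel ih =>
    intro i vis ansB a b hvlen hif hal hcnt hinvA hinvB
    have hin : i < n.toNat := by omega
    have himood : i < mood.length := by omega
    -- an unvisited index exists
    obtain ⟨k0, hk0len, hk0f⟩ := pvExists_unvisited (vis := vis) (by omega)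
    have hj00 : (0 : Int) ≤ (k0 : Int) := by omega
    have hj0n : (k0 : Int) < n := by omega
    have hj0v : pvGetB vis (k0 : Int) = false := by
      rw [pvGetB_natCast vis k0 hk0len]; exact hk0f
    -- both skips land on characterized positions
    obtain ⟨haplen, hbestA, hpreA⟩ :=
      pvPickA arr_a arr_b n vis (k0 : Int) hj00 hj0n hj0v a hinvA
    obtain ⟨hbplen, hbestB, hpreB⟩ :=
      pvPickA arr_b arr_a n vis (k0 : Int) hj00 hj0n hj0v b hinvB
    -- the head of the remaining mood list
    have hdrop : (PySem.List.slice mood none (some n)).drop i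
        = mood[i] :: (PySem.List.slice mood none (some n)).drop (i + 1) := by
      rw [PySem.List.slice_to mood hn]
      rw [List.drop_eq_getElem_cons (by simp; omega)]
      rw [List.getElem_take]
    have hmood : PySem.List.pyGetD mood (i : Int) 0 = mood[i] := by
      simp [PySem.List.pyGetD_natCast, List.getElem?_eq_getElem himood]
    rw [hdrop, List.foldl_cons]
    rw [pvLoopA]
    set La := PySem.List.sorted (pvTuples arr_a arr_b n) pvKey3 false with hLa
    set Lb := PySem.List.sorted (pvTuples arr_b arr_a n) pvKey3 false with hLb
    by_cases hm1 : mood[i] = 1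
    · -- pick from the b-list
      rw [if_pos (by rw [hmood, hm1]; rfl)]
      have hbest := (pvBest_isBest arr_a arr_b mood[i] vis n hn (k0 : Int) hj00 hj0n hj0v).1 hm1
      set picked := (Lb.getD (pvSkip Lb vis b) (0, 0, 0)).2.2 with hpk
      have hpeq : picked = pvBest arr_a arr_b mood[i] vis n := pvIsBest_unique hbestB hbest
      obtain ⟨hp0, hpn, hpv, _⟩ := hbestB
      have hptoNat : picked.toNat < vis.length := by omega
      have hpfalse : vis[picked.toNat] = false := by
        rw [pvGetB_toNat hp0, List.getD_eq_getElem _ _ hptoNat] at hpv; exact hpv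
      have hsetvis : PySem.List.pySetD vis picked true = vis.set picked.toNat true :=
        PySem.List.pySetD_of_nonneg vis true hp0
      have hsetans : PySem.List.pySetD (ansB ++ List.replicate (fuel + 1) 0) (i : Int) (picked + 1)
          = (ansB ++ [picked + 1]) ++ List.replicate fuel 0 := by
        rw [PySem.List.pySetD_natCast, List.replicate_succ, ← hal,
          List.set_append_right _ _ (le_refl _)]
        simp
      simp only [hsetvis, hsetans]
      have hmonoA : ∀ q, q < pvSkip La vis a → q < La.length →
          pvGetB (vis.set picked.toNat true) ((La.getD q (0, 0, 0)).2.2) = true := by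
        intro q hq hqlen
        have h0 : 0 ≤ (La.getD q (0, 0, 0)).2.2 := by
          rw [List.getD_eq_getElem _ _ hqlen]
          exact (pvL_mem (La.getElem_mem hqlen)).1
        exact pvGetB_set_mono _ h0 (hpreA q hq hqlen)
      have hmonoB : ∀ q, q < pvSkip Lb vis b + 1 → q < Lb.length →
          pvGetB (vis.set picked.toNat true) ((Lb.getD q (0, 0, 0)).2.2) = true := by
        intro q hq hqlen
        rcases Nat.lt_or_ge q (pvSkip Lb vis b) with h | h
        · have h0 : 0 ≤ (Lb.getD q (0, 0, 0)).2.2 := by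
            rw [List.getD_eq_getElem _ _ hqlen]
            exact (pvL_mem (Lb.getElem_mem hqlen)).1
          exact pvGetB_set_mono _ h0 (hpreB q h hqlen)
        · have hq' : q = pvSkip Lb vis b := by omega
          subst hq'
          rw [← hpk]
          exact pvGetB_set_self hp0 (by omega)
      have := ih (i + 1) (vis.set picked.toNat true) (ansB ++ [picked + 1])
        (pvSkip La vis a) (pvSkip Lb vis b + 1)
        (by simpa using hvlen) (by omega) (by simp [hal]) (by
          have := pvCount_false_set vis picked.toNat hptoNat hpfalse
          omega) hmonoA hmonoB
      rw [this]
      simp only [← hpeq, hsetvis]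
    · -- pick from the a-list
      rw [if_neg (by rw [hmood]; simp [hm1])]
      have hbest := (pvBest_isBest arr_a arr_b mood[i] vis n hn (k0 : Int) hj00 hj0n hj0v).2 hm1
      set picked := (La.getD (pvSkip La vis a) (0, 0, 0)).2.2 with hpk
      have hpeq : picked = pvBest arr_a arr_b mood[i] vis n := pvIsBest_unique hbestA hbest
      obtain ⟨hp0, hpn, hpv, _⟩ := hbestA
      have hptoNat : picked.toNat < vis.length := by omega
      have hpfalse : vis[picked.toNat] = false := by
        rw [pvGetB_toNat hp0, List.getD_eq_getElem _ _ hptoNat] at hpv; exact hpv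
      have hsetvis : PySem.List.pySetD vis picked true = vis.set picked.toNat true :=
        PySem.List.pySetD_of_nonneg vis true hp0
      have hsetans : PySem.List.pySetD (ansB ++ List.replicate (fuel + 1) 0) (i : Int) (picked + 1)
          = (ansB ++ [picked + 1]) ++ List.replicate fuel 0 := by
        rw [PySem.List.pySetD_natCast, List.replicate_succ, ← hal,
          List.set_append_right _ _ (le_refl _)]
        simp
      simp only [hsetvis, hsetans]
      have hmonoB : ∀ q, q < pvSkip Lb vis b → q < Lb.length →
          pvGetB (vis.set picked.toNat true) ((Lb.getD q (0, 0, 0)).2.2) = true := by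
        intro q hq hqlen
        have h0 : 0 ≤ (Lb.getD q (0, 0, 0)).2.2 := by
          rw [List.getD_eq_getElem _ _ hqlen]
          exact (pvL_mem (Lb.getElem_mem hqlen)).1
        exact pvGetB_set_mono _ h0 (hpreB q hq hqlen)
      have hmonoA : ∀ q, q < pvSkip La vis a + 1 → q < La.length →
          pvGetB (vis.set picked.toNat true) ((La.getD q (0, 0, 0)).2.2) = true := by
        intro q hq hqlen
        rcases Nat.lt_or_ge q (pvSkip La vis a) with h | h
        · have h0 : 0 ≤ (La.getD q (0, 0, 0)).2.2 := by
            rw [List.getD_eq_getElem _ _ hqlen]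
            exact (pvL_mem (La.getElem_mem hqlen)).1
          exact pvGetB_set_mono _ h0 (hpreA q h hqlen)
        · have hq' : q = pvSkip La vis a := by omega
          subst hq'
          rw [← hpk]
          exact pvGetB_set_self hp0 (by omega)
      have := ih (i + 1) (vis.set picked.toNat true) (ansB ++ [picked + 1])
        (pvSkip La vis a + 1) (pvSkip Lb vis b)
        (by simpa using hvlen) (by omega) (by simp [hal]) (by
          have := pvCount_false_set vis picked.toNat hptoNat hpfalse
          omega) hmonoA hmonoB
      rw [this]
      simp only [← hpeq, hsetvis]

-- ===== VERDICT =====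
theorem algorithms_spec : Claim_equal_algorithms := by
  intro n arr_a arr_b mood _hdom hpre
  obtain ⟨hn, _ha, _hb, hm⟩ := hpre
  unfold Spec_algorithms algorithms algorithms_alt
  have h := pvSim arr_a arr_b mood n hn hm n.toNat 0 (List.replicate n.toNat false) [] 0 0
    (by simp) (by omega) rfl (by simp)
    (by intro q hq; omega) (by intro q hq; omega)
  simpa using h
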